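-- pv_equiv track=rewrite | github.com/kvshravan/holiday | maxh/app.py | encode_spaces
-- ===== SOURCE A (Python) =====
-- def encode_spaces(s):
--     lis = []
--     for c in s:
--         if c != ' ':
--             lis.append(c)
--         else:
--             lis.append('+')
--     return "".join(lis)
-- ===== SOURCE B (Python) =====
-- def encode_spaces(s):
--     return '+'.join(s.split(' '))
-- ===== Notes on version B (the rewrite author's own statement) =====
-- stated objective: idiomatic
-- what changed: Replaces the per-character loop-and-append with a tokenize-then-rejoin strategy: split the string on single spaces and join the tokens with a plus sign, which runs in C-level str methods instead of a Python-level character loop.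
import Mathlib
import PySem

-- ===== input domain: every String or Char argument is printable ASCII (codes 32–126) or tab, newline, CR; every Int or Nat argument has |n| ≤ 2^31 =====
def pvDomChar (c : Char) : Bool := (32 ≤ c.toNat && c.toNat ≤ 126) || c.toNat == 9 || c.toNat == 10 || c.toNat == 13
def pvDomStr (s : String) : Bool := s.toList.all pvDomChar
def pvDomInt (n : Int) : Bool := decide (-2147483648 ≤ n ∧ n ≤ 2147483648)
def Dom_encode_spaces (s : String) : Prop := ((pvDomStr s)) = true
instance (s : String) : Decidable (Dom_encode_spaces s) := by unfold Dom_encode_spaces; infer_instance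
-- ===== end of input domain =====

-- B replaces A's per-character loop-and-append with split-on-space / join-with-'+' (idiomatic, same cost).


-- ===== PORT A =====
-- lis = []; for c in s: append c or '+'; return "".join(lis)  (lis holds 1-char strings)
def encode_spaces (s : String) : String :=
  let lis : List Char :=
    s.toList.foldl (fun acc c => if c != ' ' then acc ++ [c] else acc ++ ['+']) []
  String.ofList (PySem.Chars.join [] (lis.map ([·])))

-- ===== PORT B =====
-- return '+'.join(s.split(' '))   (sep " " is nonempty, so split? always returns some)
def encode_spaces_alt (s : String) : String :=
  PySem.Str.join "+" ((PySem.Str.split? s " ").getD [])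

-- ===== PRECONDITION & SPEC =====
def Spec_encode_spaces (s : String) (out : String) : Prop := out = encode_spaces_alt s
instance (s : String) (out : String) : Decidable (Spec_encode_spaces s out) := by unfold Spec_encode_spaces; infer_instance

-- ===== CLAIM (what is proved, stated in full; the proofs are below) =====
def Claim_equal_encode_spaces : Prop := ∀ (s : String), Dom_encode_spaces s → Spec_encode_spaces s (encode_spaces s)

-- ===== LEMMAS AND PROOFS =====

-- the character substitution both programs perform
def pvSub (c : Char) : Char := if c != ' ' then c else '+'

-- structural model of splitting on a single space
def pvSp : List Char → List (List Char)
  | [] => [[]]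
  | c :: rest => if c = ' ' then [] :: pvSp rest
                 else match pvSp rest with
                      | [] => [[c]]
                      | h :: t => (c :: h) :: t

theorem pvSp_ne_nil (l : List Char) : pvSp l ≠ [] := by
  cases l with
  | nil => simp [pvSp]
  | cons c rest =>
    simp only [pvSp]
    split
    · simp
    · cases h : pvSp rest <;> simp

theorem pvGo_spec (fuel : Nat) (l cur : List Char) (acc : List (List Char)) (hf : l.length < fuel) :
    PySem.Chars.splitOn.go [' '] fuel l cur acc
      = acc.reverse ++ (pvSp l).modifyHead (cur.reverse ++ ·) := by
  induction fuel generalizing l cur acc with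
  | zero => omega
  | succ fuel ih =>
    cases l with
    | nil => rw [PySem.Chars.splitOn.go.eq_def]; simp [pvSp]
    | cons c rest =>
      by_cases hc : c = ' '
      · subst hc
        have hp : List.isPrefixOf [' '] (' ' :: rest) = true := by
          simp [List.isPrefixOf]
        rw [PySem.Chars.splitOn.go.eq_def]
        simp only [hp, if_true, List.length_cons] at *
        simp only [List.length_nil, Nat.zero_add, List.drop_succ_cons, List.drop_zero]
        rw [ih rest [] (List.reverse cur :: acc) (by omega)]
        simp [pvSp, List.modifyHead]
        cases h : pvSp rest with
        | nil => exact absurd h (pvSp_ne_nil rest)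
        | cons a t => simp
      · have hp : List.isPrefixOf [' '] (c :: rest) = false := by
          simp [List.isPrefixOf]; exact fun h => (hc h.symm).elim
        rw [PySem.Chars.splitOn.go.eq_def]
        simp only [hp, Bool.false_eq_true, if_false]
        rw [ih rest (c :: cur) acc (by simpa using Nat.lt_of_succ_lt_succ hf)]
        simp only [pvSp, hc, if_false]
        cases h : pvSp rest with
        | nil => exact absurd h (pvSp_ne_nil rest)
        | cons a t => simp

theorem pvSplitOn_eq (l : List Char) : PySem.Chars.splitOn l [' '] = pvSp l := by
  have h := pvGo_spec (l.length + 1) l [] [] (by omega)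
  rw [PySem.Chars.splitOn, h]
  cases pvSp l <;> simp

theorem pvJoin_cons (sep : List Char) (c : Char) (h : List Char) (t : List (List Char)) :
    PySem.Chars.join sep ((c :: h) :: t) = c :: PySem.Chars.join sep (h :: t) := by
  cases t with
  | nil => simp [PySem.Chars.join, List.intercalate]
  | cons b t' => simp [PySem.Chars.join, List.intercalate, List.intersperse]

theorem pvJoin_sp (l : List Char) :
    PySem.Chars.join ['+'] (pvSp l) = l.map pvSub := by
  induction l with
  | nil => simp [pvSp, PySem.Chars.join, List.intercalate]
  | cons c rest ih =>
    by_cases hc : c = ' '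
    · subst hc
      simp only [pvSp, if_true]
      cases h : pvSp rest with
      | nil => exact absurd h (pvSp_ne_nil rest)
      | cons a t =>
        rw [h] at ih
        calc PySem.Chars.join ['+'] ([] :: a :: t)
            = '+' :: PySem.Chars.join ['+'] (a :: t) := by
              simp [PySem.Chars.join, List.intercalate, List.intersperse]
          _ = '+' :: rest.map pvSub := by rw [ih]
          _ = (' ' :: rest).map pvSub := by simp [pvSub]
    · simp only [pvSp, hc, if_false]
      cases h : pvSp rest with
      | nil => exact absurd h (pvSp_ne_nil rest)
      | cons a t =>
        rw [h] at ih
        rw [pvJoin_cons, ih]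
        simp [pvSub, hc]

theorem pvFoldl_map (l acc : List Char) :
    l.foldl (fun acc c => if c != ' ' then acc ++ [c] else acc ++ ['+']) acc
      = acc ++ l.map pvSub := by
  induction l generalizing acc with
  | nil => simp
  | cons c rest ih =>
    rw [List.foldl_cons, ih]
    by_cases hc : c = ' ' <;> simp [pvSub, hc]

-- ===== VERDICT (by name: the statement is the Claim_ definition above) =====
theorem encode_spaces_spec : Claim_equal_encode_spaces := by
  intro s _
  show encode_spaces s = encode_spaces_alt s
  have hA : (encode_spaces s).toList = s.toList.map pvSub := by
    simp only [encode_spaces]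
    rw [pvFoldl_map]
    simp only [List.nil_append, List.map_map]
    rw [← List.map_map]
    rw [PySem.Chars.join_nil_singletons]
    simp
  have hB : (encode_spaces_alt s).toList = s.toList.map pvSub := by
    have hsep : (" " : String).toList = [' '] := rfl
    have hplus : ("+" : String).toList = ['+'] := rfl
    simp only [encode_spaces_alt, PySem.Str.split?, PySem.Chars.split?, hsep,
      List.isEmpty_cons, Bool.false_eq_true, if_false, Option.map_some, Option.getD_some]
    rw [PySem.Str.toList_join, hplus, List.map_map]
    have hco : (String.toList ∘ String.ofList) = id := funext (fun l => String.toList_ofList (l := l))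
    rw [hco, List.map_id, pvSplitOn_eq, pvJoin_sp]
  have := hA.trans hB.symm
  exact String.toList_injective this
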